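-- pv_equiv track=rewrite | github.com/ruankuku/Monster-Generation-group9 | src/simple_character_generator.py | extract_user_style_from_features
-- ===== SOURCE A (Python) =====
-- def extract_user_style_from_features(user_features):
--     """Extract style preferences from existing user features"""
--     if not user_features or not user_features.get("preferences"):
--         return "mysterious"
--
--     prefs = user_features["preferences"]
--     if any("Horror" in p for p in prefs):
--         return "terrifying"
--     elif any("Sci-fi" in p for p in prefs):
--         return "futuristic"
--     elif any("Fantasy" in p for p in prefs):
--         return "mystical"
--     elif any("Action" in p for p in prefs):
--         return "aggressive"
--     else:
--         return "mysterious"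
-- ===== SOURCE B (Python) =====
-- KEYWORDS = ["Horror", "Sci-fi", "Fantasy", "Action"]
-- STYLES = ["terrifying", "futuristic", "mystical", "aggressive", "mysterious"]
--
-- def extract_user_style_from_features(user_features):
--     """Extract style preferences from existing user features"""
--     if not user_features or not user_features.get("preferences"):
--         return "mysterious"
--
--     # single pass: keep the best (lowest) priority rank matched so far,
--     # only testing keywords that would improve it; stop once rank 0 is found
--     best = 4
--     for p in user_features["preferences"]:
--         for i in range(best):
--             if KEYWORDS[i] in p:
--                 best = i
--                 break
--         if best == 0:
--             break
--     return STYLES[best]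
-- ===== Notes on version B (the rewrite author's own statement) =====
-- stated objective: alternative
-- what changed: Instead of four priority-ordered any() substring scans, B makes one pass over prefs maintaining the best (lowest) priority rank matched so far, pruning the inner keyword test to ranks that would improve it and stopping early at rank 0, then indexes a style table by the final rank.
import Mathlib
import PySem

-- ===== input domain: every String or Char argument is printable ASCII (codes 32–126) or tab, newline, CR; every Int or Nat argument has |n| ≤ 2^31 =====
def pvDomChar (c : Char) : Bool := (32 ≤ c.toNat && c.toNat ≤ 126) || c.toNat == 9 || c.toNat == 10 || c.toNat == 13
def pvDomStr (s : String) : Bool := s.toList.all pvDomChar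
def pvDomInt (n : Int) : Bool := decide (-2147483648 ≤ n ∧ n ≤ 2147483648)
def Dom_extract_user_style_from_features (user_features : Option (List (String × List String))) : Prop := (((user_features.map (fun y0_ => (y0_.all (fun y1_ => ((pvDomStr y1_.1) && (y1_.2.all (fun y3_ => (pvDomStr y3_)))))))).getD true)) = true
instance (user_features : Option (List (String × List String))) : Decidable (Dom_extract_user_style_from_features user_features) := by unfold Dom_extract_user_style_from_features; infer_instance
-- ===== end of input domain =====

-- B replaces A's four priority-ordered any() scans by one pass that tracks the best (lowest)
-- priority rank matched so far, pruning the inner keyword test and exiting early at rank 0,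
-- then indexes a style table by the final rank (objective: alternative, same cost class).

-- ===== PORT A =====
def extract_user_style_from_features (user_features : Option (List (String × List String))) : String :=
  match user_features with
  | none => "mysterious"                       -- `not user_features` (None)
  | some d =>
    if d.isEmpty then "mysterious"             -- `not user_features` (empty dict)
    else
      match (PySem.Dict.mk d).get? "preferences" with
      | none => "mysterious"                   -- `not user_features.get("preferences")` (missing key → None)
      | some prefs =>
        if prefs.isEmpty then "mysterious"     -- empty list is falsy
        else if prefs.any (fun p => PySem.Str.isIn "Horror" p) then "terrifying"
        else if prefs.any (fun p => PySem.Str.isIn "Sci-fi" p) then "futuristic"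
        else if prefs.any (fun p => PySem.Str.isIn "Fantasy" p) then "mystical"
        else if prefs.any (fun p => PySem.Str.isIn "Action" p) then "aggressive"
        else "mysterious"

-- ===== PORT B =====
def pvKeywords : List String := ["Horror", "Sci-fi", "Fantasy", "Action"]
def pvStyles : List String := ["terrifying", "futuristic", "mystical", "aggressive", "mysterious"]

-- Source B's inner loop: `for i in range(best): if KEYWORDS[i] in p: best = i; break`
def pvInner (p : String) (i best : Nat) : Nat :=
  if i < best then
    (if PySem.Str.isIn (pvKeywords.getD i "") p then i else pvInner p (i + 1) best)
  else best
termination_by best - i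

-- Source B's outer loop with its `if best == 0: break`
def pvOuter (prefs : List String) (best : Nat) : Nat :=
  match prefs with
  | [] => best
  | p :: rest =>
    let b := pvInner p 0 best
    if b == 0 then b else pvOuter rest b

def extract_user_style_from_features_alt (user_features : Option (List (String × List String))) : String :=
  match user_features with
  | none => "mysterious"
  | some d =>
    if d.isEmpty then "mysterious"
    else
      match (PySem.Dict.mk d).get? "preferences" with
      | none => "mysterious"
      | some prefs =>
        if prefs.isEmpty then "mysterious"
        else pvStyles.getD (pvOuter prefs 4) "mysterious"

-- ===== PRECONDITION & SPEC =====
def Spec_extract_user_style_from_features (user_features : Option (List (String × List String))) (out : String) : Prop := out = extract_user_style_from_features_alt user_features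
instance (user_features : Option (List (String × List String))) (out : String) : Decidable (Spec_extract_user_style_from_features user_features out) := by unfold Spec_extract_user_style_from_features; infer_instance

-- ===== CLAIM (what is proved, stated in full; the proofs are below) =====
def Claim_equal_extract_user_style_from_features : Prop := ∀ (user_features : Option (List (String × List String))), Dom_extract_user_style_from_features user_features → Spec_extract_user_style_from_features user_features (extract_user_style_from_features user_features)

-- ===== LEMMAS AND PROOFS =====

-- the rank of one pref: first matching keyword index, else 4
def pvRank (p : String) : Nat :=
  if PySem.Str.isIn "Horror" p then 0
  else if PySem.Str.isIn "Sci-fi" p then 1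
  else if PySem.Str.isIn "Fantasy" p then 2
  else if PySem.Str.isIn "Action" p then 3
  else 4

theorem pvInner_step (p : String) (i best : Nat) (h : i < best) :
    pvInner p i best =
      if PySem.Str.isIn (pvKeywords.getD i "") p then i else pvInner p (i + 1) best := by
  rw [pvInner]; simp [h]

theorem pvInner_stop (p : String) (i best : Nat) (h : ¬ i < best) :
    pvInner p i best = best := by
  rw [pvInner]; simp [h]

theorem pvInner_eq_min (p : String) (best : Nat) (hb : best ≤ 4) :
    pvInner p 0 best = min best (pvRank p) := by
  interval_cases best
  · rw [pvInner_stop _ _ _ (by omega)]; omega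
  · rw [pvInner_step _ _ _ (by omega), pvInner_stop _ _ _ (by omega)]
    simp only [pvKeywords, pvRank, List.getD]; norm_num
    split_ifs <;> simp_all
  · rw [pvInner_step _ _ _ (by omega), pvInner_step _ _ _ (by omega),
        pvInner_stop _ _ _ (by omega)]
    simp only [pvKeywords, pvRank, List.getD]; norm_num
    split_ifs <;> simp_all
  · rw [pvInner_step _ _ _ (by omega), pvInner_step _ _ _ (by omega),
        pvInner_step _ _ _ (by omega), pvInner_stop _ _ _ (by omega)]
    simp only [pvKeywords, pvRank, List.getD]; norm_num
    split_ifs <;> simp_all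
  · rw [pvInner_step _ _ _ (by omega), pvInner_step _ _ _ (by omega),
        pvInner_step _ _ _ (by omega), pvInner_step _ _ _ (by omega),
        pvInner_stop _ _ _ (by omega)]
    simp only [pvKeywords, pvRank, List.getD]; norm_num
    split_ifs <;> simp_all

theorem pvOuter_eq_fold (prefs : List String) (best : Nat) (hb : best ≤ 4) :
    pvOuter prefs best = prefs.foldl (fun b p => min b (pvRank p)) best := by
  induction prefs generalizing best with
  | nil => rfl
  | cons p rest ih =>
    simp only [pvOuter, List.foldl, pvInner_eq_min p best hb]
    by_cases h0 : min best (pvRank p) = 0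
    · simp only [h0, beq_self_eq_true, if_true]
      have : ∀ l : List String, l.foldl (fun b p => min b (pvRank p)) 0 = 0 := by
        intro l; induction l <;> simp_all
      exact (this rest).symm
    · have hne : (min best (pvRank p) == 0) = false := by simp [h0]
      simp only [hne, Bool.false_eq_true, if_false]
      exact ih _ (le_trans (min_le_left _ _) hb)

-- the if-chain A computes, as a rank
def pvR (prefs : List String) : Nat :=
  if prefs.any (fun p => PySem.Str.isIn "Horror" p) then 0
  else if prefs.any (fun p => PySem.Str.isIn "Sci-fi" p) then 1
  else if prefs.any (fun p => PySem.Str.isIn "Fantasy" p) then 2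
  else if prefs.any (fun p => PySem.Str.isIn "Action" p) then 3
  else 4

theorem pvR_le (prefs : List String) : pvR prefs ≤ 4 := by
  unfold pvR; split_ifs <;> omega

theorem pvR_cons (p : String) (rest : List String) :
    pvR (p :: rest) = min (pvRank p) (pvR rest) := by
  cases h1 : PySem.Str.isIn "Horror" p <;> cases h2 : PySem.Str.isIn "Sci-fi" p <;>
    cases h3 : PySem.Str.isIn "Fantasy" p <;> cases h4 : PySem.Str.isIn "Action" p <;>
    simp only [pvR, pvRank, List.any_cons, h1, h2, h3, h4, Bool.true_or, Bool.false_or,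
      Bool.false_eq_true, if_true, if_false] <;>
    split_ifs <;> omega

theorem fold_min (prefs : List String) (best : Nat) (hb : best ≤ 4) :
    prefs.foldl (fun b p => min b (pvRank p)) best = min best (pvR prefs) := by
  induction prefs generalizing best with
  | nil => simp [pvR]; omega
  | cons p rest ih =>
    rw [List.foldl, ih _ (le_trans (min_le_left _ _) hb), pvR_cons, Nat.min_assoc]

theorem fold_min_rank (prefs : List String) (best : Nat) (hb : best = 4) :
    prefs.foldl (fun b p => min b (pvRank p)) best =
      (if prefs.any (fun p => PySem.Str.isIn "Horror" p) then 0
       else if prefs.any (fun p => PySem.Str.isIn "Sci-fi" p) then 1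
       else if prefs.any (fun p => PySem.Str.isIn "Fantasy" p) then 2
       else if prefs.any (fun p => PySem.Str.isIn "Action" p) then 3
       else 4) := by
  subst hb
  rw [fold_min prefs 4 (le_refl 4),
      show min 4 (pvR prefs) = pvR prefs from by have := pvR_le prefs; omega]
  rfl

-- ===== VERDICT (by name: the statement is the Claim_ definition above) =====
theorem extract_user_style_from_features_spec : Claim_equal_extract_user_style_from_features := by
  intro uf _
  unfold Spec_extract_user_style_from_features extract_user_style_from_features extract_user_style_from_features_alt
  match uf with
  | none => rfl
  | some d =>
    cases hD : d.isEmpty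
    · simp only [hD, Bool.false_eq_true, if_false]
      cases hG : (PySem.Dict.mk d).get? "preferences" with
      | none => rfl
      | some prefs =>
        cases hP : prefs.isEmpty
        · simp only [hP, Bool.false_eq_true, if_false]
          rw [pvOuter_eq_fold prefs 4 (by omega), fold_min_rank prefs 4 rfl]
          split_ifs <;> simp [pvStyles]
        · simp [hP]
    · simp [hD]
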